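-- pv_equiv track=rewrite | github.com/jagdish-git/Interview-Programs | test.py | count_characters_reversed
-- ===== SOURCE A (Python) =====
-- def count_characters_reversed(input_string):
--     # Reverse the input string
--     reversed_string = input_string[::-1]
--
--     # Dictionary to store the count of each character
--     char_count = {}
--
--     # Count occurrences of each character
--     for char in reversed_string:
--         if char != ' ':  # Skip spaces
--             if char in char_count:
--                 char_count[char] += 1
--             else:
--                 char_count[char] = 1
--
--     # Create the output string with counts
--     output = ''.join(f"{char}{count}" for char, count in char_count.items())
--
--     return output
-- ===== SOURCE B (Python) =====
-- def count_characters_reversed(input_string):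
--     # Single forward pass (no reversal): maintain a move-to-end "recency"
--     # list of the distinct non-space characters (most recently seen last)
--     # and a running count per character; emit the recency list back-to-front,
--     # which is exactly first-seen order of the reversed string.
--     recency = []
--     counts = {}
--     for c in input_string:
--         if c != ' ':
--             if c in recency:
--                 recency.remove(c)
--             recency.append(c)
--             counts[c] = counts.get(c, 0) + 1
--     return ''.join(f"{c}{counts[c]}" for c in reversed(recency))
-- ===== Notes on version B (the rewrite author's own statement) =====
-- stated objective: alternative
-- what changed: B never reverses the string and never iterates a counting dict: one forward pass maintains an explicit move-to-end recency list of the distinct non-space characters plus a running count, and the output is emitted by walking the recency list back-to-front.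
import Mathlib
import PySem

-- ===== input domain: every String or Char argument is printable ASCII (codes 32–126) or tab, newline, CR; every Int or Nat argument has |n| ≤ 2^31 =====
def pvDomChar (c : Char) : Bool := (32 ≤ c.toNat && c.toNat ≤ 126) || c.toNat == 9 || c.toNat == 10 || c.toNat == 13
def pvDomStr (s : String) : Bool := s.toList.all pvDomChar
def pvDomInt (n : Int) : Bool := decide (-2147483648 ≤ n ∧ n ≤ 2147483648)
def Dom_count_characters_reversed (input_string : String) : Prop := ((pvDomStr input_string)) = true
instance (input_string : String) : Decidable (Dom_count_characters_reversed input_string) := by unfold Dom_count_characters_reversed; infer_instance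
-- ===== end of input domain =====

-- B replaces A's reverse-then-count-then-iterate-the-dict with a single forward
-- pass that maintains a move-to-end recency list plus running counts and emits
-- the recency list back-to-front (objective: alternative).

-- ===== PORT A =====
def count_characters_reversed (input_string : String) : String :=
  -- reversed_string = input_string[::-1]
  let reversed_string : String := (PySem.Str.slice? input_string none none (-1)).getD ""
  -- char_count = {}; for char in reversed_string: if char != ' ': …
  let char_count : PySem.Dict Char Int :=
    reversed_string.toList.foldl
      (fun d char =>
        if char ≠ ' ' then
          if d.contains char then d.modify char 0 (· + 1)
          else d.insert char 1
        else d)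
      PySem.Dict.empty
  -- ''.join(f"{char}{count}" for char, count in char_count.items())
  String.ofList (PySem.Chars.join [] (char_count.items.map (fun p => p.1 :: PySem.Int.toChars p.2)))

-- ===== PORT B =====
def count_characters_reversed_alt (input_string : String) : String :=
  -- recency = []; counts = {}; for c in input_string: if c != ' ': …
  let st : List Char × PySem.Dict Char Int :=
    input_string.toList.foldl
      (fun st c =>
        if c ≠ ' ' then
          -- if c in recency: recency.remove(c); recency.append(c)
          -- (remove? returns some here: the membership guard makes .getD exact)
          ((if c ∈ st.1 then (PySem.List.remove? st.1 c).getD st.1 else st.1) ++ [c],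
           -- counts[c] = counts.get(c, 0) + 1
           st.2.insert c (st.2.getD c 0 + 1))
        else st)
      ([], PySem.Dict.empty)
  -- ''.join(f"{c}{counts[c]}" for c in reversed(recency))
  -- counts[c]: every char of recency is a key of counts, so getD 0 is exact here
  String.ofList (PySem.Chars.join [] (st.1.reverse.map (fun c => c :: PySem.Int.toChars (st.2.getD c 0))))

-- ===== PRECONDITION & SPEC =====
def Spec_count_characters_reversed (input_string : String) (out : String) : Prop := out = count_characters_reversed_alt input_string
instance (input_string : String) (out : String) : Decidable (Spec_count_characters_reversed input_string out) := by unfold Spec_count_characters_reversed; infer_instance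

-- ===== CLAIM (what is proved, stated in full; the proofs are below) =====
def Claim_equal_count_characters_reversed : Prop := ∀ (input_string : String), Dom_count_characters_reversed input_string → Spec_count_characters_reversed input_string (count_characters_reversed input_string)

-- ===== LEMMAS AND PROOFS =====

-- A's loop body (branch on containment) is exactly the Counter step.
theorem step_eq_counter_step (d : PySem.Dict Char Int) (c : Char) :
    (if d.contains c then d.modify c 0 (· + 1) else d.insert c 1) = d.modify c 0 (· + 1) := by
  by_cases h : d.contains c = true
  · simp [h]
  · have hm : d.modify c 0 (· + 1) = d.insert c (d.getD c 0 + 1) := rfl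
    simp [h, hm, PySem.Dict.getD_of_not_contains]

-- A's counting loop builds Counter(filtered chars).
theorem fold_eq_counter (l : List Char) :
    l.foldl (fun d c => if d.contains c then d.modify c 0 (· + 1) else d.insert c 1)
      PySem.Dict.empty = PySem.Dict.counter l := by
  rw [PySem.Dict.counter_eq_foldl]
  apply PySem.List.foldl_congr_mem
  intro d c _
  exact step_eq_counter_step d c

-- B's pair fold splits into the recency fold and the counts fold.
theorem foldl_pair_split (l : List Char) (r : List Char) (d : PySem.Dict Char Int) :
    l.foldl
      (fun (st : List Char × PySem.Dict Char Int) c =>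
        ((if c ∈ st.1 then (PySem.List.remove? st.1 c).getD st.1 else st.1) ++ [c],
         st.2.insert c (st.2.getD c 0 + 1))) (r, d)
    = (l.foldl (fun r c => (if c ∈ r then (PySem.List.remove? r c).getD r else r) ++ [c]) r,
       l.foldl (fun d c => d.insert c (d.getD c 0 + 1)) d) := by
  induction l generalizing r d with
  | nil => rfl
  | cons c l ih => simp [List.foldl, ih]

-- The move-to-end step on a duplicate-free list is "drop c, append c".
theorem rec_step_nodup (r : List Char) (c : Char) (h : r.Nodup) :
    (if c ∈ r then (PySem.List.remove? r c).getD r else r) ++ [c]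
      = r.filter (fun x => !(x == c)) ++ [c] := by
  by_cases hm : c ∈ r
  · rw [if_pos hm, PySem.List.remove?_eq_some_erase r c hm, Option.getD_some,
      List.Nodup.erase_eq_filter h]
    rfl
  · rw [if_neg hm, List.filter_eq_self.mpr
      (fun a ha => by simp only [Bool.not_eq_eq_eq_not, Bool.not_true, beq_eq_false_iff_ne, ne_eq]
                      exact fun e => hm (e ▸ ha))]

-- Folding the move-to-end step over m.reverse yields set(m) reversed.
theorem recency_fold (m : List Char) :
    m.reverse.foldl (fun r c => (if c ∈ r then (PySem.List.remove? r c).getD r else r) ++ [c]) []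
      = (PySem.Set.ofList m).reverse := by
  induction m with
  | nil => rfl
  | cons c m ih =>
    have hnd : (PySem.Set.ofList m).reverse.Nodup :=
      List.nodup_reverse.mpr (PySem.Set.nodup_ofList m)
    rw [List.reverse_cons, List.foldl_append, ih, List.foldl_cons, List.foldl_nil,
      rec_step_nodup _ _ hnd, PySem.Set.ofList_cons]
    have hd : PySem.Set.discard (PySem.Set.ofList m) c
        = (PySem.Set.ofList m).filter (fun y => !(y == c)) := rfl
    simp [hd, List.filter_reverse]

-- ===== VERDICT (by name: the statement is the Claim_ definition above) =====
theorem count_characters_reversed_spec : Claim_equal_count_characters_reversed := by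
  intro s _
  unfold Spec_count_characters_reversed count_characters_reversed count_characters_reversed_alt
  simp only [PySem.Str.slice?_none_none_neg_one, Option.getD_some, String.toList_ofList]
  rw [PySem.List.foldl_ite_eq_foldl_filter (p := fun c => c ≠ ' '),
      PySem.List.foldl_ite_eq_foldl_filter (p := fun c => c ≠ ' '),
      fold_eq_counter, PySem.Dict.items_counter, foldl_pair_split]
  have hl : s.toList.reverse.filter (fun c => decide (c ≠ ' '))
      = (s.toList.filter (fun c => decide (c ≠ ' '))).reverse := by
    simp [List.filter_reverse]
  set l := s.toList.filter (fun c => decide (c ≠ ' ')) with hldef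
  rw [hl]
  have hr : l.foldl (fun r c => (if c ∈ r then (PySem.List.remove? r c).getD r else r) ++ [c]) []
      = (PySem.Set.ofList l.reverse).reverse := by
    have := recency_fold l.reverse
    rwa [List.reverse_reverse] at this
  simp only [hr, List.reverse_reverse, List.map_map, Function.comp_def,
    PySem.Dict.foldl_insert_getD_add_one_eq_counter, PySem.Dict.getD_counter,
    List.count_reverse]
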